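-- pv_equiv track=rewrite | github.com/hyunwoo47p/descriptor-toolkit | Chem_Descriptor_ML/preprocessing/schema_generator.py | normalize_column_names
-- ===== SOURCE A (Python) =====
-- from typing import List, Set, Optional
--
-- def normalize_column_names(columns: List[str]) -> List[str]:
--     """
--     CRITICAL SHARED FUNCTION: Normalize column names with consistent duplicate handling
--
--     This function MUST be identical in both:
--     - generate_master_schema.py (schema generation)
--     - make_descriptors_fixed.py (actual calculation)
--
--     Rules:
--     1. First occurrence: keep as-is
--     2. Second occurrence: add "_1" suffix
--     3. Third occurrence: add "_2" suffix, etc.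
--
--     Example: ["ABC", "ABC", "DEF", "ABC"] -> ["ABC", "ABC_1", "DEF", "ABC_2"]
--     """
--     seen = {}
--     normalized = []
--
--     for col in columns:
--         if col in seen:
--             seen[col] += 1
--             normalized.append(f"{col}_{seen[col]}")
--         else:
--             seen[col] = 0
--             normalized.append(col)
--
--     return normalized
-- ===== SOURCE B (Python) =====
-- def normalize_column_names(columns):
--     """
--     CRITICAL SHARED FUNCTION: Normalize column names with consistent duplicate handling
--     (re-implementation: two phases -- group positions by name, then scatter-assign names)
--     """
--     groups = {}
--     for i, col in enumerate(columns):
--         groups.setdefault(col, []).append(i)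
--     result = [None] * len(columns)
--     for col, positions in groups.items():
--         for k, pos in enumerate(positions):
--             result[pos] = col if k == 0 else f"{col}_{k}"
--     return result
-- ===== Notes on version B (the rewrite author's own statement) =====
-- stated objective: alternative
-- what changed: Replaces A's single running-count pass by a two-phase index-then-assign structure: first group all positions by column name into a dict of position lists, then allocate the result and scatter-write each group's names (bare for the first position, suffixed _k after) into their positions.
import Mathlib
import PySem

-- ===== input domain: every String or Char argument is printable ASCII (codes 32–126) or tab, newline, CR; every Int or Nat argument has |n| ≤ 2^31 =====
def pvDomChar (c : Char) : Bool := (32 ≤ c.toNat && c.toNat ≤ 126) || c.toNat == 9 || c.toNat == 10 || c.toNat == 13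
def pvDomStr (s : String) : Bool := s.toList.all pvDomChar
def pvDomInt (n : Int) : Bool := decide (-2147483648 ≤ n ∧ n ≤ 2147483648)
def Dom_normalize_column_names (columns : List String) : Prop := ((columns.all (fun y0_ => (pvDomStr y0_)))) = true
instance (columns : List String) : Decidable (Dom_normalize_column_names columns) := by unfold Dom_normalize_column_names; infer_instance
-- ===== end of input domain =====

-- B replaces A's single running-count pass by a two-phase structure: group all positions by
-- name into a dict, then scatter-assign the (possibly suffixed) names; objective: alternative.

-- ===== PORT A =====
-- literal port of A: one pass, dict 'seen' (name -> running count), list accumulator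
def normalize_column_names (columns : List String) : List String :=
  (columns.foldl
    (fun (st : PySem.Dict String Int × List String) col =>
      match st.1.get? col with
      | some v => (st.1.insert col (v + 1), st.2 ++ [col ++ "_" ++ PySem.Int.toStr (v + 1)])
      | none   => (st.1.insert col 0, st.2 ++ [col]))
    (PySem.Dict.empty, [])).2

-- ===== PORT B =====
-- literal port of B: phase 1 groups positions by name (setdefault-append = Dict.modify);
-- phase 2 allocates the result ([None]*n ported as replicate "", every slot is overwritten)
-- and scatter-writes each group; result[pos] = v with pos a nonnegative in-range enumerate
-- index is exactly List.set at pos.toNat.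
def normalize_column_names_alt (columns : List String) : List String :=
  let groups := (PySem.List.enumerate columns).foldl
    (fun (g : PySem.Dict String (List Int)) p => g.modify p.2 [] (fun l => l ++ [p.1]))
    PySem.Dict.empty
  groups.items.foldl
    (fun res cp =>
      (PySem.List.enumerate cp.2).foldl
        (fun r kp => r.set kp.2.toNat (if kp.1 == 0 then cp.1 else cp.1 ++ "_" ++ PySem.Int.toStr kp.1))
        res)
    (List.replicate columns.length "")

-- ===== PRECONDITION & SPEC =====
def Spec_normalize_column_names (columns : List String) (out : List String) : Prop := out = normalize_column_names_alt columns
instance (columns : List String) (out : List String) : Decidable (Spec_normalize_column_names columns out) := by unfold Spec_normalize_column_names; infer_instance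

-- ===== CLAIM (what is proved, stated in full; the proofs are below) =====
def Claim_equal_normalize_column_names : Prop := ∀ (columns : List String), Dom_normalize_column_names columns → Spec_normalize_column_names columns (normalize_column_names columns)

-- ===== LEMMAS AND PROOFS =====

-- the intended name for column c when the columns before it are 'pre'
def pvName (pre : List String) (c : String) : String :=
  if List.count c pre = 0 then c else c ++ "_" ++ PySem.Int.toStr (List.count c pre : Int)

-- reference computation: normalize 'suf' given already-seen prefix 'pre'
def pvGo : List String → List String → List String
  | _, [] => []
  | pre, c :: rest => pvName pre c :: pvGo (pre ++ [c]) rest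

-- one scatter write of B's phase 2, for group name c
def pvStep (c : String) (r : List String) (kp : Int × Int) : List String :=
  r.set kp.2.toNat (if kp.1 == 0 then c else c ++ "_" ++ PySem.Int.toStr kp.1)

-- positions (as Python ints, starting at s) of the occurrences of c in xs
def pvPos : List String → Int → String → List Int
  | [], _, _ => []
  | x :: xs, s, c => if x = c then s :: pvPos xs (s + 1) c else pvPos xs (s + 1) c

lemma pvGo_length (suf : List String) : ∀ pre, (pvGo pre suf).length = suf.length := by
  induction suf with
  | nil => intro pre; rfl
  | cons c rest ih => intro pre; simp [pvGo, ih]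

lemma pvGo_getElem? (suf : List String) : ∀ (pre : List String) (j : Nat) (c : String),
    suf[j]? = some c → (pvGo pre suf)[j]? = some (pvName (pre ++ suf.take j) c) := by
  induction suf with
  | nil => intro pre j c h; simp at h
  | cons x rest ih =>
      intro pre j c h
      cases j with
      | zero => simp at h; subst h; simp [pvGo]
      | succ j =>
          simp at h
          have := ih (pre ++ [x]) j c h
          simpa [pvGo, List.append_assoc] using this

lemma pvPos_eq_filter (xs : List String) : ∀ (s : Int) (c : String),
    (((PySem.List.enumerate xs s).filter (fun p => p.2 == c)).map (fun p => p.1)) = pvPos xs s c := by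
  induction xs with
  | nil => intro s c; simp [PySem.List.enumerate_nil, pvPos]
  | cons x rest ih =>
      intro s c
      rw [PySem.List.enumerate_cons]
      by_cases h : x = c
      · simp [pvPos, h, ih]
      · simp [pvPos, h, ih]

lemma pvPos_le (xs : List String) : ∀ (s : Int) (c : String) (x : Int), x ∈ pvPos xs s c → s ≤ x := by
  induction xs with
  | nil => intro s c x h; simp [pvPos] at h
  | cons y rest ih =>
      intro s c x h
      unfold pvPos at h
      split at h
      · rcases List.mem_cons.mp h with h | h
        · omega
        · have := ih (s + 1) c x h; omega
      · have := ih (s + 1) c x h; omega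

lemma pvPos_nodup (xs : List String) : ∀ (s : Int) (c : String), (pvPos xs s c).Nodup := by
  induction xs with
  | nil => intro s c; simp [pvPos]
  | cons y rest ih =>
      intro s c
      unfold pvPos
      split
      · refine List.nodup_cons.mpr ⟨fun hmem => ?_, ih (s + 1) c⟩
        have := pvPos_le rest (s + 1) c s hmem; omega
      · exact ih (s + 1) c

lemma pvPos_mem_spec (xs : List String) : ∀ (s : Int) (c : String) (x : Int),
    x ∈ pvPos xs s c → ∃ j : Nat, x = s + j ∧ xs[j]? = some c := by
  induction xs with
  | nil => intro s c x h; simp [pvPos] at h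
  | cons y rest ih =>
      intro s c x h
      unfold pvPos at h
      split at h
      · next hy =>
        rcases List.mem_cons.mp h with h | h
        · exact ⟨0, by omega, by simp [hy]⟩
        · obtain ⟨j, hj, hjc⟩ := ih (s + 1) c x h
          exact ⟨j + 1, by push_cast; omega, by simpa using hjc⟩
      · obtain ⟨j, hj, hjc⟩ := ih (s + 1) c x h
        exact ⟨j + 1, by push_cast; omega, by simpa using hjc⟩

lemma pvPos_mem_of (xs : List String) : ∀ (s : Int) (c : String) (j : Nat),
    xs[j]? = some c → (s + (j : Int)) ∈ pvPos xs s c := by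
  induction xs with
  | nil => intro s c j h; simp at h
  | cons y rest ih =>
      intro s c j h
      cases j with
      | zero => simp at h; simp [pvPos, h]
      | succ j =>
          simp at h
          have hmem := ih (s + 1) c j h
          unfold pvPos
          split
          · refine List.mem_cons.mpr (Or.inr ?_)
            convert hmem using 1; push_cast; omega
          · convert hmem using 1; push_cast; omega

lemma pvPos_idxOf (xs : List String) : ∀ (s : Int) (c : String) (j : Nat),
    xs[j]? = some c → List.idxOf (s + (j : Int)) (pvPos xs s c) = (xs.take j).count c := by
  induction xs with
  | nil => intro s c j h; simp at h
  | cons y rest ih =>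
      intro y_s c j h
      cases j with
      | zero => simp at h; simp [pvPos, h]
      | succ j =>
          simp at h
          have hrec := ih (y_s + 1) c j h
          have harg : y_s + ((j : Int) + 1) = (y_s + 1) + (j : Int) := by omega
          by_cases hy : y = c
          · simp only [pvPos, if_pos hy]
            rw [List.idxOf_cons_ne _ (by push_cast; omega)]
            push_cast
            rw [harg, hrec]
            simp [hy]
          · simp only [pvPos, if_neg hy]
            push_cast
            rw [harg, hrec]
            simp [hy]

lemma inner_length (c : String) (ps : List Int) : ∀ (s : Int) (r : List String),
    ((PySem.List.enumerate ps s).foldl (pvStep c) r).length = r.length := by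
  induction ps with
  | nil => intro s r; simp [PySem.List.enumerate_nil]
  | cons q rest ih =>
      intro s r
      rw [PySem.List.enumerate_cons, List.foldl_cons, ih]
      simp [pvStep]

lemma inner_preserve (c : String) (ps : List Int) : ∀ (s : Int) (r : List String) (i : Nat),
    (∀ x ∈ ps, 0 ≤ x) → (i : Int) ∉ ps →
    ((PySem.List.enumerate ps s).foldl (pvStep c) r)[i]? = r[i]? := by
  induction ps with
  | nil => intro s r i _ _; simp [PySem.List.enumerate_nil]
  | cons q rest ih =>
      intro s r i hnn hni
      rw [PySem.List.enumerate_cons, List.foldl_cons]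
      simp only [List.mem_cons, not_or] at hni
      have hq : 0 ≤ q := hnn q (List.mem_cons_self ..)
      have hqi : q.toNat ≠ i := by
        intro h
        exact hni.1 (by omega)
      rw [ih (s + 1) _ i (fun x hx => hnn x (List.mem_cons_of_mem _ hx)) hni.2]
      exact List.getElem?_set_ne hqi

lemma inner_write (c : String) (ps : List Int) : ∀ (s : Int) (r : List String) (i : Nat),
    (∀ x ∈ ps, 0 ≤ x) → ps.Nodup → (i : Int) ∈ ps → i < r.length →
    ((PySem.List.enumerate ps s).foldl (pvStep c) r)[i]? =
      some (if s + (List.idxOf (i : Int) ps : Int) == 0 then c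
            else c ++ "_" ++ PySem.Int.toStr (s + (List.idxOf (i : Int) ps : Int))) := by
  induction ps with
  | nil => intro s r i _ _ h _; simp at h
  | cons q rest ih =>
      intro s r i hnn hnd hmem hlen
      rw [PySem.List.enumerate_cons, List.foldl_cons]
      by_cases hq : q = (i : Int)
      · have hrest : (i : Int) ∉ rest := hq ▸ (List.nodup_cons.mp hnd).1
        rw [inner_preserve c rest (s + 1) _ i (fun x hx => hnn x (List.mem_cons_of_mem _ hx)) hrest]
        have hset : (pvStep c r (s, q))[i]? = some (if s == 0 then c else c ++ "_" ++ PySem.Int.toStr s) := by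
          have hti : q.toNat = i := by
            have := hnn q (List.mem_cons_self ..); omega
          simp only [pvStep, hti]
          exact List.getElem?_set_self hlen
        rw [hset, hq, List.idxOf_cons_self]
        norm_num
      · have hmem' : (i : Int) ∈ rest := by
          rcases List.mem_cons.mp hmem with h | h
          · exact absurd h.symm hq
          · exact h
        have hlen' : i < (pvStep c r (s, q)).length := by simp [pvStep, hlen]
        rw [ih (s + 1) _ i (fun x hx => hnn x (List.mem_cons_of_mem _ hx)) (List.nodup_cons.mp hnd).2 hmem' hlen']
        rw [List.idxOf_cons_ne _ (by exact_mod_cast hq)]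
        have harg : (s + 1) + (List.idxOf (i : Int) rest : Int)
            = s + ((List.idxOf (i : Int) rest + 1 : Nat) : Int) := by push_cast; omega
        rw [harg]

lemma outer_length (xs : List String) (cs : List String) : ∀ (r : List String),
    (cs.foldl (fun r c => ((PySem.List.enumerate (pvPos xs 0 c)).foldl (pvStep c) r)) r).length
      = r.length := by
  induction cs with
  | nil => intro r; rfl
  | cons c rest ih =>
      intro r
      rw [List.foldl_cons, ih, inner_length]

lemma outer_write (xs : List String) (cs : List String) : ∀ (r : List String) (i : Nat) (c0 : String),
    cs.Nodup → xs[i]? = some c0 → c0 ∈ cs → i < r.length →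
    (cs.foldl (fun r c => ((PySem.List.enumerate (pvPos xs 0 c)).foldl (pvStep c) r)) r)[i]?
      = some (pvName (xs.take i) c0) := by
  induction cs with
  | nil => intro r i c0 _ _ h _; simp at h
  | cons c rest ih =>
      intro r i c0 hnd hxi hc0 hlen
      rw [List.foldl_cons]
      have hnotmem : ∀ c', c' ≠ c0 → (i : Int) ∉ pvPos xs 0 c' := by
        intro c' hne hmem
        obtain ⟨j, hj, hjc⟩ := pvPos_mem_spec xs 0 c' (i : Int) hmem
        have : j = i := by omega
        subst this
        rw [hxi] at hjc
        exact hne (Option.some.inj hjc).symm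
      by_cases hc : c = c0
      · subst hc
        -- the head group writes position i; the remaining groups do not touch it
        have hpres : ∀ c' ∈ rest, (i : Int) ∉ pvPos xs 0 c' := by
          intro c' hc' hmem
          exact hnotmem c' (fun he => (List.nodup_cons.mp hnd).1 (he ▸ hc')) hmem
        have houter : ∀ (r' : List String),
            (rest.foldl (fun r c => ((PySem.List.enumerate (pvPos xs 0 c)).foldl (pvStep c) r)) r')[i]?
              = r'[i]? := by
          intro r'
          clear ih hc0 hnd
          induction rest generalizing r' with
          | nil => rfl
          | cons c' rest' ih' =>
              rw [List.foldl_cons, ih' (fun d hd => hpres d (List.mem_cons_of_mem _ hd))]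
              exact inner_preserve c' _ 0 r' i (fun x hx => pvPos_le xs 0 c' x hx)
                (hpres c' (List.mem_cons_self ..))
        rw [houter]
        have hmem : (i : Int) ∈ pvPos xs 0 c := by
          have := pvPos_mem_of xs 0 c i hxi
          simpa using this
        rw [inner_write c _ 0 r i (fun x hx => pvPos_le xs 0 c x hx) (pvPos_nodup xs 0 c) hmem hlen]
        have hidx := pvPos_idxOf xs 0 c i hxi
        simp only [zero_add] at hidx ⊢
        rw [hidx]
        by_cases h0 : (xs.take i).count c = 0
        · simp [pvName, h0]
        · simp only [pvName, if_neg h0]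
          have hne : (((xs.take i).count c : Int)) ≠ 0 := by exact_mod_cast h0
          simp only [Option.some.injEq]
          rw [if_neg (by simpa using hne)]
      · have hc0' : c0 ∈ rest := by
          rcases List.mem_cons.mp hc0 with h | h
          · exact absurd h.symm hc
          · exact h
        have hlen' : i < (((PySem.List.enumerate (pvPos xs 0 c)).foldl (pvStep c) r)).length := by
          rw [inner_length]; exact hlen
        exact ih _ i c0 (List.nodup_cons.mp hnd).2 hxi hc0' hlen'

-- phase 1 of B: the grouping dict, characterised by library lemmas
lemma groups_getD (columns : List String) (c : String) :
    (((PySem.List.enumerate columns).foldl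
        (fun (g : PySem.Dict String (List Int)) p => g.modify p.2 [] (fun l => l ++ [p.1]))
        PySem.Dict.empty)).getD c [] = pvPos columns 0 c := by
  have hswap : (((PySem.List.enumerate columns).map Prod.swap).foldl
      (fun (g : PySem.Dict String (List Int)) p => g.modify p.1 [] (fun l => l ++ [p.2]))
      PySem.Dict.empty)
      = ((PySem.List.enumerate columns).foldl
        (fun (g : PySem.Dict String (List Int)) p => g.modify p.2 [] (fun l => l ++ [p.1]))
        PySem.Dict.empty) := by
    rw [List.foldl_map]
    rfl
  rw [← hswap, PySem.Dict.getD_foldl_modify_append]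
  rw [List.filter_map, List.map_map]
  simp only [PySem.Dict.getD_empty, List.nil_append]
  exact pvPos_eq_filter columns 0 c

lemma groups_keys (columns : List String) :
    (((PySem.List.enumerate columns).foldl
        (fun (g : PySem.Dict String (List Int)) p => g.modify p.2 [] (fun l => l ++ [p.1]))
        PySem.Dict.empty)).keys = PySem.Set.ofList columns := by
  rw [PySem.Dict.keys_foldl_modify_key (PySem.List.enumerate columns) Prod.snd []
    (fun _ p => (fun l => l ++ [p.1])) PySem.Dict.empty]
  rw [PySem.Dict.keys_empty, PySem.List.map_snd_enumerate, PySem.Set.update_nil_left]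

lemma alt_eq_scatter (columns : List String) :
    normalize_column_names_alt columns
      = (PySem.Set.ofList columns).foldl
          (fun r c => ((PySem.List.enumerate (pvPos columns 0 c)).foldl (pvStep c) r))
          (List.replicate columns.length "") := by
  have hdef : normalize_column_names_alt columns
      = (((PySem.List.enumerate columns).foldl
          (fun (g : PySem.Dict String (List Int)) p => g.modify p.2 [] (fun l => l ++ [p.1]))
          PySem.Dict.empty)).items.foldl
        (fun res cp =>
          (PySem.List.enumerate cp.2).foldl
            (fun r kp => r.set kp.2.toNat (if kp.1 == 0 then cp.1 else cp.1 ++ "_" ++ PySem.Int.toStr kp.1))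
            res)
        (List.replicate columns.length "") := rfl
  rw [hdef]
  have hnd : (((PySem.List.enumerate columns).foldl
      (fun (g : PySem.Dict String (List Int)) p => g.modify p.2 [] (fun l => l ++ [p.1]))
      PySem.Dict.empty)).keys.Nodup := by
    exact PySem.Dict.nodup_keys_foldl_modify_key (PySem.List.enumerate columns) Prod.snd []
      (fun _ p => (fun l => l ++ [p.1])) PySem.Dict.empty (by simp [PySem.Dict.keys_empty])
  rw [PySem.Dict.items_eq_map_keys _ hnd []]
  rw [List.foldl_map, groups_keys]
  simp only [groups_getD]
  rfl

lemma alt_eq_go_nil (columns : List String) :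
    normalize_column_names_alt columns = pvGo [] columns := by
  rw [alt_eq_scatter]
  apply List.ext_getElem?_iff.mpr
  intro i
  by_cases hi : i < columns.length
  · have hxi : columns[i]? = some columns[i] := List.getElem?_eq_getElem hi
    rw [outer_write columns (PySem.Set.ofList columns) _ i columns[i]
      (PySem.Set.nodup_ofList columns) hxi
      ((PySem.Set.mem_ofList ..).mpr (List.getElem_mem hi))
      (by simp [hi]),
      pvGo_getElem? columns [] i columns[i] hxi]
    simp
  · rw [List.getElem?_eq_none, List.getElem?_eq_none]
    · rw [pvGo_length]; omega
    · rw [outer_length, List.length_replicate]; omega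

lemma loopA_eq_go : ∀ (rest pre : List String) (d : PySem.Dict String Int) (acc : List String),
    (∀ c, d.get? c = if List.count c pre = 0 then none else some ((List.count c pre : Int) - 1)) →
    (rest.foldl
      (fun (st : PySem.Dict String Int × List String) col =>
        match st.1.get? col with
        | some v => (st.1.insert col (v + 1), st.2 ++ [col ++ "_" ++ PySem.Int.toStr (v + 1)])
        | none   => (st.1.insert col 0, st.2 ++ [col]))
      (d, acc)).2 = acc ++ pvGo pre rest := by
  intro rest
  induction rest with
  | nil => intro pre d acc _; simp [pvGo]
  | cons c rest ih =>
      intro pre d acc hd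
      rw [List.foldl_cons]
      by_cases h0 : List.count c pre = 0
      · have hget : d.get? c = none := by rw [hd c]; simp [h0]
        simp only [hget]
        have hd' : ∀ x, (d.insert c 0).get? x =
            if List.count x (pre ++ [c]) = 0 then none else some ((List.count x (pre ++ [c]) : Int) - 1) := by
          intro x
          rw [PySem.Dict.get?_insert]
          by_cases hx : x = c
          · subst hx; simp [List.count_append, h0]
          · simp [hx, hd x, List.count_append, Ne.symm hx]
        rw [ih (pre ++ [c]) _ _ hd']
        simp [pvGo, pvName, h0]
      · have hget : d.get? c = some ((List.count c pre : Int) - 1) := by rw [hd c]; simp [h0]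
        simp only [hget]
        have hv : (List.count c pre : Int) - 1 + 1 = (List.count c pre : Int) := by ring
        have hd' : ∀ x, (d.insert c ((List.count c pre : Int) - 1 + 1)).get? x =
            if List.count x (pre ++ [c]) = 0 then none else some ((List.count x (pre ++ [c]) : Int) - 1) := by
          intro x
          rw [PySem.Dict.get?_insert]
          by_cases hx : x = c
          · subst hx; simp [List.count_append, hv]
          · simp [hx, hd x, List.count_append, Ne.symm hx]
        rw [ih (pre ++ [c]) _ _ hd']
        simp [pvGo, pvName, h0, hv]

-- ===== VERDICT (by name: the statement is the Claim_ definition above) =====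
theorem normalize_column_names_spec : Claim_equal_normalize_column_names := by
  intro columns _
  unfold Spec_normalize_column_names
  rw [alt_eq_go_nil]
  have h := loopA_eq_go columns [] PySem.Dict.empty [] (by intro c; simp [PySem.Dict.get?_empty])
  simpa [normalize_column_names] using h
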